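-- pv_equiv track=rewrite | github.com/krishna86399/Battleships | battleship.py | isHorizontal
-- ===== SOURCE A (Python) =====
-- def isHorizontal(ship):
--     row=[]
--     col=[]
--     for i in range(len(ship)):
--         row.append(ship[i][0])
--         col.append(ship[i][1])
--     count=0
--     truecount=0
--     r=row[0]
--     for i in range(1,len(ship)):
--         if(r==row[i]):
--            count=count+1
--     if count==len(ship)-1:
--        truecount=truecount+1
--
--     col.sort()
--     count=0
--     for i in range (len(ship)-1):
--         if (col[i]+1==col[i+1]):
--           count=count+1
--     if (count==len(ship)-1):
--         truecount=truecount+1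
--     if truecount==2:
--         return True
--     else:
--         return False
-- ===== SOURCE B (Python) =====
-- def isHorizontal(ship):
--     rows_ok = all(cell[0] == ship[0][0] for cell in ship)
--     colset = {cell[1] for cell in ship}
--     m = min(cell[1] for cell in ship)
--     return rows_ok and len(colset) == len(ship) and all(m + i in colset for i in range(len(ship)))
-- ===== Notes on version B (the rewrite author's own statement) =====
-- stated objective: idiomatic
-- what changed: A sorts the column list and scans adjacent differences; B never sorts: it builds the set of columns once and checks distinctness plus membership of min+i for each i, and replaces the two hand-counting loops over the row list with a single all() over the cells.
-- outside the precondition, e.g. on isHorizontal([]): A raises IndexError, B raises ValueError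
import Mathlib
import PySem

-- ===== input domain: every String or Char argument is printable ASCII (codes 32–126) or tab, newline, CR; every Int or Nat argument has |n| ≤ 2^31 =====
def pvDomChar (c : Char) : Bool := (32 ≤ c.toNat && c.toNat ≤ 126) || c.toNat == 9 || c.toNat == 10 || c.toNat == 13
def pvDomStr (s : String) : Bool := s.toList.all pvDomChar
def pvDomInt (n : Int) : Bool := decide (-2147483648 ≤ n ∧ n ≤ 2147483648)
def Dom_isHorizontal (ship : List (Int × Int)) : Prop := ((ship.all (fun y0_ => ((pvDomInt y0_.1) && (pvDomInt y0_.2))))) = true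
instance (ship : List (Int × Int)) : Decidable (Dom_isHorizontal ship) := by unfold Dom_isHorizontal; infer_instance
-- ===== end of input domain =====

-- B replaces A's sort + adjacent-difference scan by a set of the columns probed at min+0, …, min+n-1 (idiomatic; no sort).

-- ===== PORT A =====
def isHorizontal (ship : List (Int × Int)) : Bool :=
  let row := (PySem.List.pyRange 0 (ship.length : Int)).foldl
      (fun acc i => acc ++ [(PySem.List.pyGetD ship i (0, 0)).1]) []
  let col := (PySem.List.pyRange 0 (ship.length : Int)).foldl
      (fun acc i => acc ++ [(PySem.List.pyGetD ship i (0, 0)).2]) []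
  match PySem.List.pyGet? row 0 with
  | none => false   -- Python raises IndexError here (empty ship); excluded by Pre_
  | some r =>
    let count : Int := (PySem.List.pyRange 1 (ship.length : Int)).foldl
        (fun c i => if r = PySem.List.pyGetD row i 0 then c + 1 else c) 0
    let truecount : Int := if count = (ship.length : Int) - 1 then 1 else 0
    let col2 := PySem.List.sorted col (fun x => x)
    let count2 : Int := (PySem.List.pyRange 0 ((ship.length : Int) - 1)).foldl
        (fun c i => if PySem.List.pyGetD col2 i 0 + 1 = PySem.List.pyGetD col2 (i + 1) 0 then c + 1 else c) 0
    let truecount2 := truecount + (if count2 = (ship.length : Int) - 1 then 1 else 0)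
    decide (truecount2 = 2)

-- ===== PORT B =====
def isHorizontal_alt (ship : List (Int × Int)) : Bool :=
  let rowsOk := ship.all (fun cell => cell.1 == (PySem.List.pyGetD ship 0 (0, 0)).1)
  let colset : PySem.Set Int := PySem.Set.ofList (ship.map (fun cell => cell.2))
  match PySem.List.min? (ship.map (fun cell => cell.2)) (fun x => x) with
  | none => false   -- Python raises ValueError here (empty ship); excluded by Pre_
  | some m =>
    rowsOk && (PySem.Set.len colset == (ship.length : Int))
      && (PySem.List.pyRange 0 (ship.length : Int)).all
           (fun i => PySem.Set.contains colset (m + i))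

-- ===== PRECONDITION & SPEC =====
-- Pre_ excludes only the empty list, on which Python A raises IndexError (row[0]) and Python B raises ValueError (min of empty).
def Pre_isHorizontal (ship : List (Int × Int)) : Prop := ship ≠ []
instance (ship : List (Int × Int)) : Decidable (Pre_isHorizontal ship) := by unfold Pre_isHorizontal; infer_instance
def pvWitness_isHorizontal : (List (Int × Int)) := [(1, 2), (1, 3)]
def Spec_isHorizontal (ship : List (Int × Int)) (out : Bool) : Prop := out = isHorizontal_alt ship
instance (ship : List (Int × Int)) (out : Bool) : Decidable (Spec_isHorizontal ship out) := by unfold Spec_isHorizontal; infer_instance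

-- ===== CLAIM (what is proved, stated in full; the proofs are below) =====
def Claim_equal_isHorizontal : Prop := ∀ (ship : List (Int × Int)), Dom_isHorizontal ship → Pre_isHorizontal ship → Spec_isHorizontal ship (isHorizontal ship)

-- ===== LEMMAS AND PROOFS =====

-- adjacency of the sorted column list, as A's scan checks it
def AdjOne (s : List Int) : Prop := ∀ k : Nat, (h : k + 1 < s.length) → s[k] + 1 = s[k + 1]

-- ofList is a sublist of its input
theorem ofList_sublist (xs : List Int) : (PySem.Set.ofList xs).Sublist xs := by
  induction xs with
  | nil => simp [PySem.Set.ofList]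
  | cons x xs ih =>
    rw [PySem.Set.ofList_cons]
    refine List.Sublist.cons₂ x ?_
    have h1 : (PySem.Set.ofList xs).discard x = (PySem.Set.ofList xs).filter (fun y => !(y == x)) := by
      simp [PySem.Set.discard]
    rw [h1]
    exact (List.filter_sublist.trans ih)

theorem nodup_of_ofList_length (xs : List Int) (h : (PySem.Set.ofList xs).length = xs.length) :
    xs.Nodup := by
  have := (ofList_sublist xs).eq_of_length h
  rw [← this]; exact PySem.Set.nodup_ofList xs

-- an AdjOne sorted run is exactly the range starting at its head
theorem adj_eq_pyRange (s0 : Int) (t : List Int) (h : AdjOne (s0 :: t)) :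
    s0 :: t = PySem.List.pyRange s0 (s0 + ((s0 :: t).length : Int)) := by
  apply List.ext_getElem
  · simp [PySem.List.length_pyRange_one]
  · intro k h1 h2
    rw [PySem.List.getElem_pyRange_one]
    induction k with
    | zero => simp
    | succ k ih =>
      have hk : k + 1 < (s0 :: t).length := h1
      have hk' : k < (s0 :: t).length := by omega
      have := h k hk
      have ihk := ih hk' (by rw [PySem.List.length_pyRange_one]; omega)
      omega

-- the column equivalence: A's "sorted columns are consecutive" ↔ B's "distinct and min+i all present"
theorem col_equiv (l : List Int) (hne : l ≠ []) (m : Int)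
    (hm : PySem.List.min? l (fun x => x) = some m) :
    AdjOne (PySem.List.sorted l (fun x => x)) ↔
      ((PySem.Set.ofList l).length = l.length ∧
        ∀ i : Int, 0 ≤ i → i < (l.length : Int) → (m + i) ∈ PySem.Set.ofList l) := by
  constructor
  · intro hadj
    obtain ⟨s0, t, hst⟩ : ∃ s0 t, PySem.List.sorted l (fun x => x) = s0 :: t := by
      rcases hh : PySem.List.sorted l (fun x => x) with _ | ⟨s0, t⟩
      · exact absurd ((PySem.List.sorted_eq_nil_iff _ _ _).mp hh) hne
      · exact ⟨s0, t, rfl⟩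
    rw [hst] at hadj
    have hrange := adj_eq_pyRange s0 t hadj
    have hlen : (s0 :: t).length = l.length := by
      rw [← hst]; exact PySem.List.length_sorted l _ _
    have hperm : (s0 :: t).Perm l := by rw [← hst]; exact PySem.List.sorted_perm l _ _
    have hnd : l.Nodup := by
      refine (hperm.nodup_iff).mp ?_
      rw [hrange]; exact PySem.List.nodup_pyRange_one _ _
    have hof : PySem.Set.ofList l = l := PySem.Set.ofList_eq_self_of_nodup l hnd
    -- m = s0
    have hms0 : m = s0 := by
      have h1 : m ≤ s0 := PySem.List.min?_isMin hm s0 (hperm.mem_iff.mp (by simp))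
      have h2 : s0 ≤ m := PySem.List.key_head_sorted_le l (fun x => x) hst m (PySem.List.min?_mem hm)
      omega
    refine ⟨by rw [hof, ← hlen], ?_⟩
    intro i h0 hi
    rw [hof]
    refine hperm.mem_iff.mp ?_
    rw [hrange, PySem.List.mem_pyRange_one]
    constructor <;> omega
  · rintro ⟨hlen, hmem⟩
    have hnd : l.Nodup := nodup_of_ofList_length l hlen
    have hof : PySem.Set.ofList l = l := PySem.Set.ofList_eq_self_of_nodup l hnd
    have hTlen : (PySem.List.pyRange m (m + (l.length : Int))).length = l.length := by
      rw [PySem.List.length_pyRange_one]; omega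
    have hTsub : PySem.List.pyRange m (m + (l.length : Int)) ⊆ l := by
      intro x hx
      rw [PySem.List.mem_pyRange_one] at hx
      have := hmem (x - m) (by omega) (by omega)
      rw [hof] at this
      simpa using this
    have hperm : (PySem.List.pyRange m (m + (l.length : Int))).Perm l :=
      ((PySem.List.nodup_pyRange_one _ _).subperm hTsub).perm_of_length_le (by omega)
    have hsort : PySem.List.sorted l (fun x => x) = PySem.List.pyRange m (m + (l.length : Int)) :=
      PySem.List.sorted_eq_of_perm_of_pairwise_lt l (PySem.List.pyRange m (m + (l.length : Int))) (fun x => x) hperm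
        (PySem.List.pairwise_lt_pyRange_one _ _)
    rw [hsort]
    intro k hk
    have hk' : k < (PySem.List.pyRange m (m + (l.length : Int))).length := by omega
    rw [PySem.List.getElem_pyRange_one _ _ k hk', PySem.List.getElem_pyRange_one _ _ (k+1) hk]
    push_cast; ring

-- A's loop over range(len) building ship[i].1 / .2 is the projection map
theorem build_fold (p : Int × Int) (rest : List (Int × Int)) (f : Int × Int → Int) :
    (PySem.List.pyRange 0 (((p :: rest).length : Int))).foldl
        (fun acc i => acc ++ [f (PySem.List.pyGetD (p :: rest) i (0, 0))]) []
      = (p :: rest).map f := by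
  rw [PySem.List.foldl_pyRange_zero_pyGetD' (p :: rest) (0,0) (fun acc x => acc ++ [f x]) []]
  rw [PySem.List.foldl_append_singleton_eq_map]
  simp

-- counting loop = countP
theorem count_fold (pr : Int → Bool) (xs : List Int) (a : Int) :
    xs.foldl (fun c x => if pr x = true then c + 1 else c) a = a + (xs.countP pr : Int) :=
  PySem.List.foldl_count_if pr xs a

theorem count2_iff (s : List Int) (hs : s ≠ []) :
    (((PySem.List.pyRange 0 ((s.length : Int) - 1)).countP
        (fun j => decide (PySem.List.pyGetD s j 0 + 1 = PySem.List.pyGetD s (j + 1) 0))) : Int)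
      = (s.length : Int) - 1 ↔ AdjOne s := by
  have hne : 0 < s.length := List.length_pos_iff.mpr hs
  have hlenr : (PySem.List.pyRange 0 ((s.length : Int) - 1)).length = s.length - 1 := by
    rw [PySem.List.length_pyRange_one]; omega
  constructor
  · intro h k hk
    have hcp : (PySem.List.pyRange 0 ((s.length : Int) - 1)).countP
        (fun j => decide (PySem.List.pyGetD s j 0 + 1 = PySem.List.pyGetD s (j + 1) 0))
        = (PySem.List.pyRange 0 ((s.length : Int) - 1)).length := by omega
    have hall := List.countP_eq_length.mp hcp
    have hkmem : (k : Int) ∈ PySem.List.pyRange 0 ((s.length : Int) - 1) :=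
      PySem.List.mem_pyRange_one.mpr ⟨by positivity, by omega⟩
    have hthis := hall _ hkmem
    simp only [decide_eq_true_eq] at hthis
    rw [PySem.List.pyGetD_natCast, PySem.List.pyGetD_of_nonneg _ _ (by positivity)] at hthis
    have hk1 : ((k : Int) + 1).toNat = k + 1 := by omega
    rw [hk1, List.getD_eq_getElem _ _ (by omega), List.getD_eq_getElem _ _ hk] at hthis
    exact hthis
  · intro h
    have hcp : (PySem.List.pyRange 0 ((s.length : Int) - 1)).countP
        (fun j => decide (PySem.List.pyGetD s j 0 + 1 = PySem.List.pyGetD s (j + 1) 0))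
        = (PySem.List.pyRange 0 ((s.length : Int) - 1)).length := by
      rw [List.countP_eq_length]
      intro i hi
      rw [PySem.List.mem_pyRange_one] at hi
      obtain ⟨hi0, hi1⟩ := hi
      have hik : i = ((i.toNat : Nat) : Int) := by omega
      have hklt : i.toNat + 1 < s.length := by omega
      have hadj := h i.toNat hklt
      simp only [decide_eq_true_eq]
      rw [hik, PySem.List.pyGetD_natCast, PySem.List.pyGetD_of_nonneg _ _ (by positivity)]
      have hk1 : (((i.toNat : Nat) : Int) + 1).toNat = i.toNat + 1 := by omega
      rw [hk1, List.getD_eq_getElem _ _ (by omega), List.getD_eq_getElem _ _ (by omega)]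
      exact hadj
    omega

theorem A_iff (p : Int × Int) (rest : List (Int × Int)) :
    isHorizontal (p :: rest) = true ↔
      ((∀ c ∈ rest, p.1 = c.1) ∧
        AdjOne (PySem.List.sorted ((p :: rest).map (fun c => c.2)) (fun x => x))) := by
  have hrow := build_fold p rest (fun c => c.1)
  have hcol := build_fold p rest (fun c => c.2)
  have hget : PySem.List.pyGet? ((p :: rest).map (fun c => c.1)) 0 = some p.1 := by
    simp [PySem.List.pyGet?, PySem.List.pyIdx?]
  rw [isHorizontal]
  simp only [hrow, hcol, hget]
  have hlen1 : (((p :: rest).length : Int)) = (((p :: rest).map (fun c => c.1)).length : Int) := by simp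
  rw [hlen1, PySem.List.foldl_pyRange_pyGetD' ((p :: rest).map (fun c => c.1)) 0
        (fun c x => if p.1 = x then c + 1 else c) 0 (by norm_num)]
  have hdrop : (((p :: rest).map (fun c => c.1)).drop (1 : Int).toNat) = rest.map (fun c => c.1) := by
    simp
  rw [hdrop]
  have hfun1 : (fun (c : Int) (x : Int) => if p.1 = x then c + 1 else c)
      = (fun c x => if (fun y => decide (p.1 = y)) x = true then c + 1 else c) := by
    funext c x; simp
  rw [hfun1, count_fold]
  have hfun2 : (fun (c : Int) (i : Int) =>
        if PySem.List.pyGetD (PySem.List.sorted ((p :: rest).map (fun c => c.2)) (fun x => x)) i 0 + 1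
            = PySem.List.pyGetD (PySem.List.sorted ((p :: rest).map (fun c => c.2)) (fun x => x)) (i + 1) 0
          then c + 1 else c)
      = (fun c i => if (fun j => decide
            (PySem.List.pyGetD (PySem.List.sorted ((p :: rest).map (fun c => c.2)) (fun x => x)) j 0 + 1
            = PySem.List.pyGetD (PySem.List.sorted ((p :: rest).map (fun c => c.2)) (fun x => x)) (j + 1) 0)) i = true
          then c + 1 else c) := by
    funext c i; simp
  rw [hfun2, count_fold]
  simp only [List.length_map, zero_add, decide_eq_true_eq]
  have hcount1 : ((rest.map (fun c => c.1)).countP (fun y => decide (p.1 = y)) : Int)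
        = ((p :: rest).length : Int) - 1
      ↔ (∀ c ∈ rest, p.1 = c.1) := by
    rw [show (((p :: rest).length : Int) - 1) = ((rest.map (fun c => c.1)).length : Int) by simp]
    rw [Int.natCast_inj, List.countP_eq_length]
    simp
  have hslen : (PySem.List.sorted ((p :: rest).map (fun c => c.2)) (fun x => x)).length
      = (p :: rest).length := by
    rw [PySem.List.length_sorted]; simp
  have hcount2 := count2_iff (PySem.List.sorted ((p :: rest).map (fun c => c.2)) (fun x => x))
      (by intro hc; have hl := congrArg List.length hc; simp [PySem.List.length_sorted] at hl)
  rw [hslen] at hcount2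
  constructor
  · intro h
    split_ifs at h with h1 h2
    · exact ⟨hcount1.mp h1, hcount2.mp h2⟩
    all_goals omega
  · rintro ⟨h1, h2⟩
    rw [if_pos (hcount1.mpr h1), if_pos (hcount2.mpr h2)]
    norm_num

theorem B_iff (p : Int × Int) (rest : List (Int × Int)) (m : Int)
    (hm : PySem.List.min? ((p :: rest).map (fun c => c.2)) (fun x => x) = some m) :
    isHorizontal_alt (p :: rest) = true ↔
      ((∀ c ∈ rest, p.1 = c.1) ∧
        ((PySem.Set.ofList ((p :: rest).map (fun c => c.2))).length = ((p :: rest).map (fun c => c.2)).length ∧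
          ∀ i : Int, 0 ≤ i → i < (((p :: rest).map (fun c => c.2)).length : Int) →
            (m + i) ∈ PySem.Set.ofList ((p :: rest).map (fun c => c.2)))) := by
  have hget0 : PySem.List.pyGetD (p :: rest) 0 ((0 : Int), (0 : Int)) = p := by
    simp [pysem]
  rw [isHorizontal_alt]
  simp only [hm, hget0, Bool.and_eq_true, List.all_eq_true]
  constructor
  · rintro ⟨⟨hrows, hlen⟩, hmem⟩
    refine ⟨?_, ?_, ?_⟩
    · intro c hc
      have := hrows c (by simp [hc])
      simp only [beq_iff_eq] at this
      omega
    · simp only [beq_iff_eq, PySem.Set.len] at hlen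
      simp at hlen ⊢
      omega
    · intro i h0 h1
      have hmemi : i + 0 ∈ PySem.List.pyRange 0 (((p :: rest).length : Int)) := by
        rw [PySem.List.mem_pyRange_one]; simp at h1 ⊢; omega
      have := hmem _ hmemi
      rw [PySem.Set.contains_iff] at this
      simpa using this
  · rintro ⟨hrows, hlen, hmem⟩
    refine ⟨⟨?_, ?_⟩, ?_⟩
    · intro c hc
      simp only [beq_iff_eq]
      rcases List.mem_cons.mp hc with h | h
      · rw [h]
      · exact (hrows c h).symm
    · simp only [beq_iff_eq, PySem.Set.len]
      simp at hlen ⊢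
      omega
    · intro i hi
      rw [PySem.List.mem_pyRange_one] at hi
      rw [PySem.Set.contains_iff]
      exact hmem i hi.1 (by simp at hi ⊢; omega)

theorem isHorizontal_eq (p : Int × Int) (rest : List (Int × Int)) :
    isHorizontal (p :: rest) = isHorizontal_alt (p :: rest) := by
  obtain ⟨m, hm⟩ : ∃ m, PySem.List.min? ((p :: rest).map (fun c => c.2)) (fun x => x) = some m :=
    ⟨_, PySem.List.min?_id_cons _ _⟩
  rw [Bool.eq_iff_iff, A_iff p rest, B_iff p rest m hm]
  have := col_equiv ((p :: rest).map (fun c => c.2)) (by simp) m hm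
  rw [this]

-- ===== VERDICT (by name: the statement is the Claim_ definition above) =====
theorem isHorizontal_spec : Claim_equal_isHorizontal := by
  intro ship _ hpre
  obtain ⟨p, rest, rfl⟩ := List.exists_cons_of_ne_nil hpre
  exact isHorizontal_eq p rest
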